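-- pv_equiv track=rewrite | github.com/ThomasSanna/109-python-problems-for-ccps | 19-fulcrum/19.py | can_balance
-- ===== SOURCE A (Python) =====
-- def can_balance(lst):
--   if len(lst) == 0:
--     return -1
--   for i in range(len(lst)):
--     count = 0
--     for avant in range(i):
--       count += (i-avant) * lst[avant]
--     for apres in range(i+1, len(lst)):
--       count -= (apres-i) * lst[apres]
--     if count == 0:
--       return i
--   return -1
-- ===== SOURCE B (Python) =====
-- def can_balance(lst):
--     total = sum(lst)
--     weighted = sum(j * v for j, v in enumerate(lst))
--     for i in range(len(lst)):
--         if i * total == weighted: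
--             return i
--     return -1
-- ===== Notes on version B (the rewrite author's own statement) =====
-- stated objective: faster
-- what changed: Replaces the per-index O(n) torque recomputation with two one-pass sums (total and index-weighted), since the torque at i is i*total - weighted, then a single O(1)-per-index scan.
import Mathlib
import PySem

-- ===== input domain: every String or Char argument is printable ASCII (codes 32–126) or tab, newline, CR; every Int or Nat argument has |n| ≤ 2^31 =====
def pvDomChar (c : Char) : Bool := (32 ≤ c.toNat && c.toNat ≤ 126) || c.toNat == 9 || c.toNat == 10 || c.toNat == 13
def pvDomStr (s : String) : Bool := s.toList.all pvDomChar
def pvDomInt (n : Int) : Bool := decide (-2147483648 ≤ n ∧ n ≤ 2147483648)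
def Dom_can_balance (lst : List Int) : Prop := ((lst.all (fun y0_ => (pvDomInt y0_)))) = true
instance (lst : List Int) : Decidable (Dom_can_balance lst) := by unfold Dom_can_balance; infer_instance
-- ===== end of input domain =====

-- B replaces A's quadratic per-index torque recomputation by two one-pass sums
-- (total and index-weighted) and an O(1)-per-index scan; objective: faster.

-- ===== PORT A =====
-- torque computed by the two inner loops for a given i (indices in range, so pyGetD is exact here)
def pvACount (lst : List Int) (i : Int) : Int :=
  let c := (PySem.List.pyRange 0 i 1).foldl
    (fun c avant => c + (i - avant) * PySem.List.pyGetD lst avant 0) 0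
  (PySem.List.pyRange (i + 1) (lst.length : Int) 1).foldl
    (fun c apres => c - (apres - i) * PySem.List.pyGetD lst apres 0) c

-- the outer 'for i in range(len(lst))' with its early return
def pvAScan (lst : List Int) : List Int → Int
  | [] => -1
  | i :: rest => if pvACount lst i = 0 then i else pvAScan lst rest

def can_balance (lst : List Int) : Int :=
  if (lst.length : Int) = 0 then -1
  else pvAScan lst (PySem.List.pyRange 0 (lst.length : Int) 1)

-- ===== PORT B =====
def pvBScan (total weighted : Int) : List Int → Int
  | [] => -1
  | i :: rest => if i * total = weighted then i else pvBScan total weighted rest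

def can_balance_alt (lst : List Int) : Int :=
  let total := lst.sum
  let weighted := ((PySem.List.enumerate lst).map (fun p => p.1 * p.2)).sum
  pvBScan total weighted (PySem.List.pyRange 0 (lst.length : Int) 1)

-- ===== PRECONDITION & SPEC =====
def Spec_can_balance (lst : List Int) (out : Int) : Prop := out = can_balance_alt lst
instance (lst : List Int) (out : Int) : Decidable (Spec_can_balance lst out) := by unfold Spec_can_balance; infer_instance

-- ===== CLAIM (what is proved, stated in full; the proofs are below) =====
def Claim_equal_can_balance : Prop := ∀ (lst : List Int), Dom_can_balance lst → Spec_can_balance lst (can_balance lst)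

-- ===== LEMMAS AND PROOFS =====

-- Σ over l of (i-j)*g j = i*Σ g j - Σ j*g j
theorem pv_sum_split (i : Int) (g : Int → Int) (l : List Int) :
    (l.map (fun j => (i - j) * g j)).sum
      = i * (l.map g).sum - (l.map (fun j => j * g j)).sum := by
  induction l with
  | nil => simp
  | cons x t ih => simp [ih]; ring

theorem pv_foldl_sub (a : Int) (c : Int → Int) (l : List Int) :
    l.foldl (fun acc j => acc - c j) a = a + (l.map (fun j => -(c j))).sum := by
  have h := PySem.List.foldl_add (l := l) (g := fun j => -(c j)) (a := a)
  simpa [sub_eq_add_neg] using h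

theorem pv_count_closed (lst : List Int) (i : Int) (h0 : 0 ≤ i) (h1 : i < (lst.length : Int)) :
    pvACount lst i = i * lst.sum - ((PySem.List.enumerate lst).map (fun p => p.1 * p.2)).sum := by
  set g : Int → Int := fun j => PySem.List.pyGetD lst j 0 with hgdef
  set f : Int → Int := fun j => (i - j) * g j with hfdef
  have step1 : pvACount lst i
      = ((PySem.List.pyRange 0 i 1).map f).sum
        + ((PySem.List.pyRange (i + 1) (lst.length : Int) 1).map
            (fun j => -((j - i) * g j))).sum := by
    unfold pvACount
    rw [PySem.List.foldl_add, pv_foldl_sub]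
    simp [hfdef, hgdef]
  have hneg : (fun j => -((j - i) * g j)) = f := by
    funext j; simp [hfdef]; ring
  have hsplit : PySem.List.pyRange 0 (lst.length : Int) 1
      = PySem.List.pyRange 0 i 1 ++ [i] ++ PySem.List.pyRange (i + 1) (lst.length : Int) 1 := by
    rw [PySem.List.pyRange_one_append 0 i (lst.length : Int) h0 (by omega),
        PySem.List.pyRange_one_append i (i + 1) (lst.length : Int) (by omega) (by omega),
        PySem.List.pyRange_one_singleton, List.append_assoc]
  have hfi : f i = 0 := by simp [hfdef]
  have step2 : pvACount lst i = ((PySem.List.pyRange 0 (lst.length : Int) 1).map f).sum := by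
    rw [step1, hneg, hsplit]
    simp [hfi]
  rw [step2, hfdef, pv_sum_split]
  have hS : ((PySem.List.pyRange 0 (lst.length : Int) 1).map g).sum = lst.sum := by
    rw [hgdef, PySem.List.map_pyGetD_pyRange_zero']
  have hW : ((PySem.List.pyRange 0 (lst.length : Int) 1).map (fun j => j * g j)).sum
      = ((PySem.List.enumerate lst).map (fun p => p.1 * p.2)).sum := by
    rw [hgdef, PySem.List.enumerate_eq_map_pyRange (d := 0)]
    simp [List.map_map]; rfl
  rw [hS, hW]

theorem pv_scan_eq (lst : List Int) (S W : Int) (l : List Int)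
    (h : ∀ i ∈ l, pvACount lst i = i * S - W) :
    pvAScan lst l = pvBScan S W l := by
  induction l with
  | nil => rfl
  | cons x t ih =>
    have hx := h x (List.mem_cons_self ..)
    have ht : ∀ i ∈ t, pvACount lst i = i * S - W := fun i hi => h i (List.mem_cons_of_mem _ hi)
    simp only [pvAScan, pvBScan, hx]
    by_cases hc : x * S = W
    · simp [hc]
    · have : ¬ (x * S - W = 0) := by omega
      simp [this, hc, ih ht]

-- ===== VERDICT (by name: the statement is the Claim_ definition above) =====
theorem can_balance_spec : Claim_equal_can_balance := by
  intro lst _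
  unfold Spec_can_balance can_balance can_balance_alt
  by_cases h : (lst.length : Int) = 0
  · have : lst = [] := by
      cases lst with
      | nil => rfl
      | cons x t => exfalso; simp at h; omega
    subst this; simp [pvBScan, PySem.List.pyRange]
  · simp only [h, if_false]
    exact pv_scan_eq lst _ _ _ (fun i hi => by
      have := (PySem.List.mem_pyRange_one).1 hi
      exact pv_count_closed lst i this.1 this.2)
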